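-- pv_equiv track=rewrite | github.com/minhprovjp/UEBA-Platform | MA-sim/test_performance_quality_validation.py | _extract_attack_indicators
-- ===== SOURCE A (Python) =====
-- def _extract_attack_indicators(queries):
--     """Extract attack indicators from queries"""
--     indicators = set()
--
--     for query in queries:
--         query_upper = query.upper()
--
--         # Common attack patterns
--         attack_patterns = [
--             'UNION', 'OR 1=1', '/*', '*/', 'LIMIT 500', 'LIMIT 1000',
--             'BUSINESS_', 'AUDIT_', 'MAINTENANCE', 'URGENT', 'OVERTIME'
--         ]
--
--         for pattern in attack_patterns:
--             if pattern in query_upper: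
--                 indicators.add(pattern)
--
--     return indicators
-- ===== SOURCE B (Python) =====
-- def _extract_attack_indicators(queries):
--     """Extract attack indicators from queries.
--
--     Worklist version: keep a shrinking list of patterns still to look for,
--     move the ones that match out of it, and stop as soon as none remain."""
--     attack_patterns = [
--         'UNION', 'OR 1=1', '/*', '*/', 'LIMIT 500', 'LIMIT 1000',
--         'BUSINESS_', 'AUDIT_', 'MAINTENANCE', 'URGENT', 'OVERTIME'
--     ]
--     found = []
--     remaining = attack_patterns
--     for query in queries:
--         if not remaining:
--             break
--         query_upper = query.upper()
--         found += [p for p in remaining if p in query_upper]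
--         remaining = [p for p in remaining if p not in query_upper]
--     return set(found)
-- ===== Notes on version B (the rewrite author's own statement) =====
-- stated objective: alternative
-- what changed: Replaces A's nested loops that test all 11 patterns against every query and accumulate into a mutable set with a shrinking worklist: each query partitions the list of patterns still being sought into found and remaining, and the loop stops once the worklist is empty; the result set is built once from the found list.
import Mathlib
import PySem

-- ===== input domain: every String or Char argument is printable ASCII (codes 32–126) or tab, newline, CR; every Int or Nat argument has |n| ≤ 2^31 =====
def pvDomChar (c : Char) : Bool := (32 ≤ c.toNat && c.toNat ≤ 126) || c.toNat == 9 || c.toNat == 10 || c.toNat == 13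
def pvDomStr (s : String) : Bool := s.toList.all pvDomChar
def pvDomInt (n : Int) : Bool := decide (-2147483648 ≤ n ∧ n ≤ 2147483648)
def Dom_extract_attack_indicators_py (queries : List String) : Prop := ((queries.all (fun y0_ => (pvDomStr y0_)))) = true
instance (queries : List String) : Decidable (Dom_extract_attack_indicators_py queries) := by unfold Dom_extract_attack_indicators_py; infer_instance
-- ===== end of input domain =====

-- B keeps a shrinking worklist of patterns still to find and stops early once it is empty,
-- instead of A's nested loops over all patterns per query (alternative decomposition).

-- ===== PORT A =====
-- the fixed pattern list (the same literal A builds each iteration)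
def pvPatterns : List String :=
  ["UNION", "OR 1=1", "/*", "*/", "LIMIT 500", "LIMIT 1000",
   "BUSINESS_", "AUDIT_", "MAINTENANCE", "URGENT", "OVERTIME"]

def extract_attack_indicators_py (queries : List String) : List String :=
  queries.foldl (fun indicators query =>
    let query_upper := PySem.Str.upper query
    pvPatterns.foldl (fun ind pattern =>
      if PySem.Str.isIn pattern query_upper then PySem.Set.add ind pattern else ind)
      indicators)
    PySem.Set.empty

-- ===== PORT B =====
-- the for-loop of B with its `if not remaining: break`, found and remaining as the state
def pvScan (found remaining : List String) : List String → List String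
  | [] => found
  | query :: rest =>
      if remaining.isEmpty then found
      else
        let query_upper := PySem.Str.upper query
        pvScan (found ++ remaining.filter (fun p => PySem.Str.isIn p query_upper))
               (remaining.filter (fun p => !PySem.Str.isIn p query_upper)) rest

def extract_attack_indicators_py_alt (queries : List String) : List String :=
  PySem.Set.ofList (pvScan [] pvPatterns queries)

-- ===== PRECONDITION & SPEC =====
def Spec_extract_attack_indicators_py (queries : List String) (out : List String) : Prop := out = extract_attack_indicators_py_alt queries
instance (queries : List String) (out : List String) : Decidable (Spec_extract_attack_indicators_py queries out) := by unfold Spec_extract_attack_indicators_py; infer_instance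

-- ===== CLAIM (what is proved, stated in full; the proofs are below) =====
def Claim_equal_extract_attack_indicators_py : Prop := ∀ (queries : List String), Dom_extract_attack_indicators_py queries → Spec_extract_attack_indicators_py queries (extract_attack_indicators_py queries)

-- ===== LEMMAS AND PROOFS =====

theorem pvPatterns_nodup : pvPatterns.Nodup := by decide

-- the inner pattern loop of A appends exactly the new matching patterns
theorem pvInner_eq (u : String) :
    ∀ (l : List String), l.Nodup → ∀ (s : List String),
      l.foldl (fun ind pattern =>
        if PySem.Str.isIn pattern u then PySem.Set.add ind pattern else ind) s
      = s ++ l.filter (fun p => PySem.Str.isIn p u && !(PySem.Set.contains s p)) := by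
  intro l
  induction l with
  | nil => intro _ s; simp
  | cons p t ih =>
      intro hnd s
      have hnd' : t.Nodup := hnd.of_cons
      have hpt : p ∉ t := by simp [List.nodup_cons] at hnd; exact hnd.1
      simp only [List.foldl_cons, List.filter_cons]
      by_cases hc : PySem.Str.isIn p u = true
      · by_cases hm : p ∈ s
        · have : PySem.Set.add s p = s := PySem.Set.add_of_mem hm
          rw [if_pos hc, this, ih hnd' s]
          have hcf : (PySem.Str.isIn p u && !(PySem.Set.contains s p)) = false := by
            simp [hm]
          simp only [hcf, Bool.false_eq_true, if_false]
        · have hadd : PySem.Set.add s p = s ++ [p] := PySem.Set.add_of_not_mem hm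
          rw [if_pos hc, hadd, ih hnd' (s ++ [p])]
          have hcond : (PySem.Str.isIn p u && !(PySem.Set.contains s p)) = true := by
            rw [hc]; simp [hm]
          rw [hcond, if_pos rfl]
          have hfeq : t.filter (fun q => PySem.Str.isIn q u && !(PySem.Set.contains (s ++ [p]) q))
              = t.filter (fun q => PySem.Str.isIn q u && !(PySem.Set.contains s q)) := by
            apply List.filter_congr
            intro q hq
            have hqp : q ≠ p := fun h => hpt (h ▸ hq)
            simp [hqp]
          rw [hfeq]
          simp
      · rw [if_neg hc, ih hnd' s]
        have hcf : (PySem.Str.isIn p u && !(PySem.Set.contains s p)) = false := by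
          simp only [Bool.not_eq_true] at hc
          rw [hc, Bool.false_and]
        simp only [hcf, Bool.false_eq_true, if_false]

-- A's accumulator stays duplicate-free
theorem pvA_nodup :
    ∀ (rest : List String) (s : List String), s.Nodup →
      (rest.foldl (fun indicators query =>
        pvPatterns.foldl (fun ind pattern =>
          if PySem.Str.isIn pattern (PySem.Str.upper query) then PySem.Set.add ind pattern else ind)
        indicators) s).Nodup := by
  intro rest
  induction rest with
  | nil => intro s h; simpa using h
  | cons q rest ih =>
      intro s hnd
      simp only [List.foldl_cons]
      apply ih
      rw [pvInner_eq (PySem.Str.upper q) pvPatterns pvPatterns_nodup s]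
      apply List.Nodup.append hnd (pvPatterns_nodup.filter _)
      intro x hx hx2
      have := List.of_mem_filter hx2
      simp [hx] at this

theorem pvScan_nil_remaining (found : List String) :
    ∀ (rest : List String), pvScan found [] rest = found := by
  intro rest; cases rest <;> simp [pvScan]

-- the loop correspondence: A's fold from `found` equals B's scan with the not-yet-found worklist
theorem pvScan_eq :
    ∀ (rest : List String) (found : List String), found.Nodup →
      rest.foldl (fun indicators query =>
        pvPatterns.foldl (fun ind pattern =>
          if PySem.Str.isIn pattern (PySem.Str.upper query) then PySem.Set.add ind pattern else ind)
        indicators) found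
      = pvScan found (pvPatterns.filter (fun p => !(PySem.Set.contains found p))) rest := by
  intro rest
  induction rest with
  | nil => intro found _; rfl
  | cons q rest ih =>
      intro found hnd
      simp only [List.foldl_cons]
      rw [pvInner_eq (PySem.Str.upper q) pvPatterns pvPatterns_nodup found]
      set u := PySem.Str.upper q with hu
      set R := pvPatterns.filter (fun p => !(PySem.Set.contains found p)) with hR
      set hits := pvPatterns.filter (fun p => PySem.Str.isIn p u && !(PySem.Set.contains found p)) with hhits
      have hhitsR : hits = R.filter (fun p => PySem.Str.isIn p u) := by
        rw [hR, List.filter_filter, hhits]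
      have hhits_nodup : hits.Nodup := pvPatterns_nodup.filter _
      have hdisj : ∀ x ∈ hits, x ∉ found := by
        intro x hx
        have := List.of_mem_filter hx
        simp only [Bool.and_eq_true, Bool.not_eq_true'] at this
        intro hmem
        have hct := (PySem.Set.contains_iff found x).mpr hmem
        rw [this.2] at hct
        exact Bool.false_ne_true hct

      have hnd' : (found ++ hits).Nodup :=
        List.Nodup.append hnd hhits_nodup (fun x hx hx2 => hdisj x hx2 hx)
      by_cases hRe : R.isEmpty = true
      · -- all patterns already found: both sides stay at `found`
        have hRnil : R = [] := List.isEmpty_iff.mp hRe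
        have hhits_nil : hits = [] := by rw [hhitsR, hRnil]; rfl
        rw [hhits_nil, List.append_nil, ih found hnd]
        show pvScan found R rest = pvScan found R (q :: rest)
        rw [hRnil, pvScan_nil_remaining, pvScan_nil_remaining]
      · -- B processes q: its new worklist is exactly the patterns not yet in found ++ hits
        have hstep : pvScan found R (q :: rest)
            = pvScan (found ++ R.filter (fun p => PySem.Str.isIn p u))
                (R.filter (fun p => !PySem.Str.isIn p u)) rest := by
          simp only [pvScan]
          rw [if_neg hRe]
        rw [hstep, ← hhitsR]
        rw [ih (found ++ hits) hnd']
        congr 1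
        rw [hR, List.filter_filter]
        apply List.filter_congr
        intro p hp
        show (!PySem.Set.contains (found ++ hits) p) = (!PySem.Str.isIn p u && !PySem.Set.contains found p)
        by_cases hc : p ∈ found
        · have h1 : PySem.Set.contains found p = true := (PySem.Set.contains_iff found p).mpr hc
          have h2 : PySem.Set.contains (found ++ hits) p = true :=
            (PySem.Set.contains_iff _ p).mpr (List.mem_append_left _ hc)
          rw [h1, h2]
          simp
        · have h1 : PySem.Set.contains found p = false := by
            rw [Bool.eq_false_iff]; intro h; exact hc ((PySem.Set.contains_iff found p).mp h)
          by_cases hi : PySem.Str.isIn p u = true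
          · have hph : p ∈ hits := by
              rw [hhits]; exact List.mem_filter.mpr ⟨hp, by rw [hi, h1]; rfl⟩
            have h2 : PySem.Set.contains (found ++ hits) p = true :=
              (PySem.Set.contains_iff _ p).mpr (List.mem_append_right _ hph)
            rw [h1, h2, hi]
            simp
          · have hph : p ∉ hits := by
              intro hmem
              have := List.of_mem_filter hmem
              rw [Bool.and_eq_true] at this
              exact hi this.1
            have h2 : PySem.Set.contains (found ++ hits) p = false := by
              rw [Bool.eq_false_iff]; intro h
              rcases List.mem_append.mp ((PySem.Set.contains_iff _ p).mp h) with h' | h'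
              · exact hc h'
              · exact hph h'
            simp only [Bool.not_eq_true] at hi
            rw [h1, h2, hi]
            simp

-- ===== VERDICT (by name: the statement is the Claim_ definition above) =====
theorem extract_attack_indicators_py_spec : Claim_equal_extract_attack_indicators_py := by
  intro queries _
  unfold Spec_extract_attack_indicators_py
  unfold extract_attack_indicators_py extract_attack_indicators_py_alt
  have hfilter : pvPatterns.filter (fun p => !(PySem.Set.contains ([] : List String) p)) = pvPatterns := by
    decide
  have h := pvScan_eq queries [] List.nodup_nil
  rw [hfilter] at h
  have hA : extract_attack_indicators_py queries = pvScan [] pvPatterns queries := by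
    unfold extract_attack_indicators_py
    exact h
  have hnodup : (pvScan [] pvPatterns queries).Nodup := by
    rw [← h]; exact pvA_nodup queries [] List.nodup_nil
  show extract_attack_indicators_py queries = PySem.Set.ofList (pvScan [] pvPatterns queries)
  rw [hA, PySem.Set.ofList_eq_self_of_nodup _ hnodup]
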